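-- pv_equiv track=rewrite | github.com/GDP-ADMIN/gen-ai-examples | examples/custom-pipeline/claudia_gpt/chat_history/chat_history_storage.py | find_query_in_title
-- ===== SOURCE A (Python) =====
-- def find_query_in_title(title: str, query: str) -> str | None:
--     """Find the first word or phrase in the title that contains the query.
--
--     This performs case-insensitive substring matching and returns either:
--     - The first word containing the query
--     - Or a phrase (consecutive characters) that matches across words
--
--     Args:
--         title (str): The conversation title.
--         query (str): The search query.
--
--     Returns:
--         str | None: The first matching word or phrase, or None if no match found.
--     """
--     title = title.strip()
--     query = query.strip()
--     if not title or not query: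
--         return None
--
--     title_lower = title.lower()
--     query_lower = query.lower()
--
--     idx = title_lower.find(query_lower)
--     if idx == -1:
--         return None
--
--     # Expand left to start of word
--     start = idx
--     while start > 0 and title[start - 1] != " ":
--         start -= 1
--
--     # Expand right to end of word(s)
--     end = idx + len(query)
--     while end < len(title) and title[end] != " ":
--         end += 1
--
--     return title[start:end].strip().lower()
-- ===== SOURCE B (Python) =====
-- def find_query_in_title(title, query):
--     title = title.strip()
--     query = query.strip()
--     if not title or not query:
--         return None
--     idx = title.lower().find(query.lower())
--     if idx == -1:
--         return None
--     # One left-to-right scan over title plus a sentinel space collects the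
--     # (start, end) ranges of every maximal run of non-space characters.
--     tokens = []
--     start = None
--     i = 0
--     for ch in title + " ":
--         if ch != " " and start is None:
--             start = i
--         elif ch == " " and start is not None:
--             tokens.append((start, i))
--             start = None
--         i += 1
--     left = next((s for s, e in tokens if s <= idx < e), idx)
--     pos = idx + len(query)
--     right = next((e for s, e in tokens if s <= pos < e), pos)
--     return title[left:right].strip().lower()
-- ===== Notes on version B (the rewrite author's own statement) =====
-- stated objective: alternative
-- what changed: A expands the match boundaries with two character-by-character while-loops (walk left to the word start, walk right to the word end); B instead tokenizes the title once into the (start, end) ranges of all maximal space-free runs with a single sentinel-terminated scan and looks both boundaries up in that range table.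
import Mathlib
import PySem

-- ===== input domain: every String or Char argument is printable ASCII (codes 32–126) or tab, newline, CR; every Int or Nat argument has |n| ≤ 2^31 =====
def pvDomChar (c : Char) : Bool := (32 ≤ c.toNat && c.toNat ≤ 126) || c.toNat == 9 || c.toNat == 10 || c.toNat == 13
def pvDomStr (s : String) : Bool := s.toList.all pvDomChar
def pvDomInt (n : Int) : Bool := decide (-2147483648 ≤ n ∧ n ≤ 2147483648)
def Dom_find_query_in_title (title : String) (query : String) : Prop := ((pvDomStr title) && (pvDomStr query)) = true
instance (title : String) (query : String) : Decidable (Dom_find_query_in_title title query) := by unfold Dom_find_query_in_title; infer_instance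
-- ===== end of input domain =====

-- B replaces A's two character-by-character boundary-expansion loops by one tokenizing scan
-- that collects the (start, end) ranges of all maximal space-free runs and looks both
-- boundaries up there (objective: alternative decomposition, same cost).

-- ===== PORT A =====
-- while start > 0 and title[start - 1] != " ": start -= 1   (index start-1 is always in range, so getD is exact)
def expandLeft (t : List Char) : Nat → Nat
  | 0 => 0
  | s + 1 => if t.getD s ' ' ≠ ' ' then expandLeft t s else s + 1

-- while end < len(title) and title[end] != " ": end += 1   (index end is checked in range, so getD is exact)
def expandRight (t : List Char) (e : Nat) : Nat :=
  if h : e < t.length ∧ t.getD e ' ' ≠ ' ' then expandRight t (e + 1) else e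
termination_by t.length - e
decreasing_by omega

def find_query_in_title (title : String) (query : String) : Option String :=
  let t := PySem.Chars.strip title.toList
  let q := PySem.Chars.strip query.toList
  if t = [] ∨ q = [] then none
  else
    let idx := PySem.Chars.find (PySem.Chars.lower t) (PySem.Chars.lower q)
    if idx = -1 then none
    else
      let start := expandLeft t idx.toNat
      let stop := expandRight t (idx.toNat + q.length)
      some (String.ofList (PySem.Chars.lower (PySem.Chars.strip
        (PySem.Chars.slice t (some (start : Int)) (some (stop : Int))))))

-- ===== PORT B =====
-- the single scan of Source B: for ch in title + " ": open a token at a non-space, close it at a space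
def tokGo : List Char → Nat → Option Nat → List (Nat × Nat) → List (Nat × Nat)
  | [], _, _, acc => acc
  | c :: rest, i, none, acc =>
      if c ≠ ' ' then tokGo rest (i + 1) (some i) acc else tokGo rest (i + 1) none acc
  | c :: rest, i, some s, acc =>
      if c = ' ' then tokGo rest (i + 1) none (acc ++ [(s, i)]) else tokGo rest (i + 1) (some s) acc

def find_query_in_title_alt (title : String) (query : String) : Option String :=
  let t := PySem.Chars.strip title.toList
  let q := PySem.Chars.strip query.toList
  if t = [] ∨ q = [] then none
  else
    let idx := PySem.Chars.find (PySem.Chars.lower t) (PySem.Chars.lower q)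
    if idx = -1 then none
    else
      let i := idx.toNat
      let toks := tokGo (t ++ [' ']) 0 none []
      let left := match toks.find? (fun p => decide (p.1 ≤ i) && decide (i < p.2)) with
        | some p => p.1
        | none => i
      let pos := i + q.length
      let right := match toks.find? (fun p => decide (p.1 ≤ pos) && decide (pos < p.2)) with
        | some p => p.2
        | none => pos
      some (String.ofList (PySem.Chars.lower (PySem.Chars.strip
        (PySem.Chars.slice t (some (left : Int)) (some (right : Int))))))

-- ===== PRECONDITION & SPEC =====
def Spec_find_query_in_title (title : String) (query : String) (out : Option String) : Prop := out = find_query_in_title_alt title query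
instance (title : String) (query : String) (out : Option String) : Decidable (Spec_find_query_in_title title query out) := by unfold Spec_find_query_in_title; infer_instance

-- ===== CLAIM (what is proved, stated in full; the proofs are below) =====
def Claim_equal_find_query_in_title : Prop := ∀ (title : String) (query : String), Dom_find_query_in_title title query → Spec_find_query_in_title title query (find_query_in_title title query)

-- ===== LEMMAS AND PROOFS =====

lemma lowerChar_eq_space (c : Char) (h : PySem.Chars.lowerChar c = ' ') : c = ' ' := by
  unfold PySem.Chars.lowerChar at h
  split at h
  · next hu =>
    unfold PySem.Chars.isupper at hu
    simp only [Bool.and_eq_true, decide_eq_true_eq, Char.le_def] at hu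
    have hn : 65 ≤ c.toNat ∧ c.toNat ≤ 90 := by
      constructor <;> [exact hu.1; exact hu.2]
    have hv : (c.toNat + 32).isValidChar := Or.inl (by omega)
    have ht := congrArg Char.toNat h
    rw [Char.toNat_ofNat, if_pos hv] at ht
    have hsp : Char.toNat ' ' = 32 := by decide
    omega
  · exact h

def InTok (t : List Char) (s e : Nat) : Prop :=
  s < e ∧ e ≤ t.length ∧ (∀ k, s ≤ k → k < e → t[k]? ≠ some ' ') ∧
  (s = 0 ∨ t[s - 1]? = some ' ') ∧ (e = t.length ∨ t[e]? = some ' ')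

lemma strip_head_ne_space (l : List Char) (c : Char)
    (h : (PySem.Chars.strip l).head? = some c) : c ≠ ' ' := by
  unfold PySem.Chars.strip PySem.Chars.rstrip at h
  have hpre : (List.dropWhile PySem.Chars.isspace (PySem.Chars.lstrip l).reverse).reverse
      <+: PySem.Chars.lstrip l := by
    rw [← List.reverse_suffix]
    simpa using List.dropWhile_suffix (l := (PySem.Chars.lstrip l).reverse) PySem.Chars.isspace
  obtain ⟨r, hr⟩ := hpre
  have hm : (PySem.Chars.lstrip l).head? = some c := by
    rw [← hr]
    cases hd : (List.dropWhile PySem.Chars.isspace (PySem.Chars.lstrip l).reverse).reverse with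
    | nil => rw [hd] at h; simp at h
    | cons a as => rw [hd] at h; simpa using h
  have hne : PySem.Chars.lstrip l ≠ [] := by
    intro e; rw [e] at hm; simp at hm
  have hd' : PySem.Chars.lstrip l = List.dropWhile PySem.Chars.isspace l := rfl
  rw [hd'] at hm hne
  have hh := List.head_dropWhile_not PySem.Chars.isspace (w := hne)
  rw [List.head?_eq_some_head hne] at hm
  rw [Option.some.inj hm] at hh
  intro e
  rw [e] at hh
  exact absurd hh (by decide)

lemma expandLeft_eq (t : List Char) (s e : Nat) (h : InTok t s e) :
    ∀ i, s ≤ i → i < e → expandLeft t i = s := by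
  obtain ⟨hse, hlen, hrange, hleft, _⟩ := h
  intro i
  induction i with
  | zero =>
    intro hs _
    have hs0 : s = 0 := by omega
    simp [expandLeft, hs0]
  | succ j ih =>
    intro hs hi
    by_cases hsj : s = j + 1
    · have hsp : t[j]? = some ' ' := by
        rcases hleft with h0 | hsp
        · omega
        · simpa [hsj] using hsp
      have hg : t.getD j ' ' = ' ' := by rw [List.getD_eq_getElem?_getD, hsp]; rfl
      simp only [expandLeft]
      rw [if_neg (fun hcon => hcon hg), hsj]
    · have hsj' : s ≤ j := by omega
      have hje : j < e := by omega
      have hjl : j < t.length := by omega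
      have hne : t[j]? ≠ some ' ' := hrange j hsj' hje
      have hg : t.getD j ' ' ≠ ' ' := by
        rw [List.getD_eq_getElem?_getD, List.getElem?_eq_getElem hjl]
        intro hgg; exact hne (by rw [List.getElem?_eq_getElem hjl]; simpa using hgg)
      simp only [expandLeft]
      rw [if_pos hg]
      exact ih hsj' hje

lemma expandRight_eq (t : List Char) (e : Nat) (he : e = t.length ∨ t[e]? = some ' ')
    (hel : e ≤ t.length) :
    ∀ j, j ≤ e → (∀ k, j ≤ k → k < e → t[k]? ≠ some ' ') → expandRight t j = e := by
  suffices H : ∀ n j, e - j = n → j ≤ e → (∀ k, j ≤ k → k < e → t[k]? ≠ some ' ') →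
      expandRight t j = e from fun j hj hr => H (e - j) j rfl hj hr
  intro n
  induction n with
  | zero =>
    intro j hn hj _
    have hje : j = e := by omega
    subst hje
    rw [expandRight, dif_neg]
    rintro ⟨h1, h2⟩
    rcases he with h | h
    · omega
    · exact h2 (by rw [List.getD_eq_getElem?_getD, h]; rfl)
  | succ n ih =>
    intro j hn hj hrange
    have hje : j < e := by omega
    have hjl : j < t.length := by omega
    have hne : t[j]? ≠ some ' ' := hrange j le_rfl hje
    have hg : t.getD j ' ' ≠ ' ' := by
      rw [List.getD_eq_getElem?_getD, List.getElem?_eq_getElem hjl]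
      intro hgg; exact hne (by rw [List.getElem?_eq_getElem hjl]; simpa using hgg)
    rw [expandRight, dif_pos ⟨hjl, hg⟩]
    exact ih (j + 1) (by omega) (by omega) (fun k hk1 hk2 => hrange k (by omega) hk2)

lemma tokGo_spec (t : List Char) (l : List Char) (i : Nat) (st : Option Nat) (acc : List (Nat × Nat))
    (hl : l = (t ++ [' ']).drop i)
    (hst : ∀ s, st = some s → s < i ∧ s < t.length ∧ (s = 0 ∨ (t ++ [' '])[s - 1]? = some ' ') ∧
      ∀ k, s ≤ k → k < i → (t ++ [' '])[k]? ≠ some ' ')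
    (hnone : st = none → i = 0 ∨ (t ++ [' '])[i - 1]? = some ' ')
    (hacc : ∀ p ∈ acc, InTok t p.1 p.2)
    (hcomp : ∀ k, k < i → (t ++ [' '])[k]? ≠ some ' ' →
      (∃ p ∈ acc, p.1 ≤ k ∧ k < p.2) ∨ (∃ s, st = some s ∧ s ≤ k)) :
    (∀ p ∈ tokGo l i st acc, InTok t p.1 p.2) ∧
    (∀ k, k < t.length → t[k]? ≠ some ' ' → ∃ p ∈ tokGo l i st acc, p.1 ≤ k ∧ k < p.2) := by
  induction l generalizing i st acc with
  | nil =>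
    have hle : (t ++ [' ']).length ≤ i := List.drop_eq_nil_iff.mp hl.symm
    rw [List.length_append, List.length_singleton] at hle
    simp only [tokGo]
    refine ⟨hacc, ?_⟩
    intro k hk hks
    have hku : (t ++ [' '])[k]? = t[k]? := List.getElem?_append_left hk
    rcases hcomp k (by omega) (by rw [hku]; exact hks) with ⟨p, hp, hc⟩ | ⟨s, hs, _⟩
    · exact ⟨p, hp, hc⟩
    · obtain ⟨hsi, hslen, _, hrangeS⟩ := hst s hs
      exact absurd (List.getElem?_concat_length (l := t) (a := ' '))
        (hrangeS t.length (by omega) (by omega))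
  | cons c rest ih =>
    have hc : (t ++ [' '])[i]? = some c := by
      rw [← List.head?_drop, ← hl]; rfl
    have hiu : i < (t ++ [' ']).length := (List.getElem?_eq_some_iff.mp hc).1
    have hrest : rest = (t ++ [' ']).drop (i + 1) := by
      rw [← List.tail_drop, ← hl]
      rfl
    have hulen : (t ++ [' ']).length = t.length + 1 := by
      rw [List.length_append, List.length_singleton]
    cases st with
    | none =>
      simp only [tokGo]
      split
      · next h1 =>
        -- open a token at i
        have hit : i < t.length := by
          rcases Nat.lt_or_ge i t.length with h | h
          · exact h
          · exfalso
            have : i = t.length := by omega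
            rw [this, List.getElem?_concat_length] at hc
            exact h1 (Option.some.inj hc).symm
        apply ih (i + 1) (some i) acc hrest
        · intro s hs
          injection hs with hs; subst hs
          refine ⟨by omega, hit, hnone rfl, ?_⟩
          intro k hk1 hk2
          have : k = i := by omega
          rw [this, hc]
          intro hcc; exact h1 (Option.some.inj hcc)
        · intro h; exact absurd h (by simp)
        · exact hacc
        · intro k hk hks
          rcases Nat.lt_or_ge k i with h | h
          · rcases hcomp k h hks with ⟨p, hp, hcv⟩ | ⟨s, hs, _⟩
            · exact Or.inl ⟨p, hp, hcv⟩
            · exact absurd hs (by simp)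
          · exact Or.inr ⟨i, rfl, by omega⟩
      · next h1 =>
        have hcs : c = ' ' := by simpa using h1
        subst hcs
        apply ih (i + 1) none acc hrest
        · intro s hs; exact absurd hs (by simp)
        · intro _
          right
          simpa using hc
        · exact hacc
        · intro k hk hks
          rcases Nat.lt_or_ge k i with h | h
          · rcases hcomp k h hks with ⟨p, hp, hcv⟩ | ⟨s, hs, _⟩
            · exact Or.inl ⟨p, hp, hcv⟩
            · exact absurd hs (by simp)
          · exfalso
            have : k = i := by omega
            rw [this, hc] at hks
            exact hks rfl
    | some s =>
      obtain ⟨hsi, hslen, hsb, hsr⟩ := hst s rfl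
      simp only [tokGo]
      split
      · next h1 =>
        -- close token (s, i)
        subst h1
        have hintok : InTok t s i := by
          refine ⟨hsi, by omega, ?_, ?_, ?_⟩
          · intro k hk1 hk2
            have hkt : k < t.length := by omega
            rw [← List.getElem?_append_left hkt]
            exact hsr k hk1 hk2
          · rcases hsb with h0 | hsp
            · exact Or.inl h0
            · right
              have : s - 1 < t.length := by omega
              rw [← List.getElem?_append_left this]
              exact hsp
          · rcases Nat.lt_or_ge i t.length with h | h
            · right
              rw [← List.getElem?_append_left h]
              exact hc
            · exact Or.inl (by omega)
        apply ih (i + 1) none (acc ++ [(s, i)]) hrest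
        · intro s' hs'; exact absurd hs' (by simp)
        · intro _
          right
          simpa using hc
        · intro p hp
          rcases List.mem_append.mp hp with h | h
          · exact hacc p h
          · have : p = (s, i) := by simpa using h
            rw [this]; exact hintok
        · intro k hk hks
          rcases Nat.lt_or_ge k i with h | h
          · rcases hcomp k h hks with ⟨p, hp, hcv⟩ | ⟨s', hs', hsk⟩
            · exact Or.inl ⟨p, List.mem_append.mpr (Or.inl hp), hcv⟩
            · left
              refine ⟨(s, i), List.mem_append.mpr (Or.inr (by simp)), ?_⟩
              injection hs' with hs'; subst hs'
              exact ⟨hsk, h⟩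
          · exfalso
            have : k = i := by omega
            rw [this, hc] at hks
            exact hks rfl
      · next h1 =>
        apply ih (i + 1) (some s) acc hrest
        · intro s' hs'
          injection hs' with hs'; subst hs'
          refine ⟨by omega, hslen, hsb, ?_⟩
          intro k hk1 hk2
          rcases Nat.lt_or_ge k i with h | h
          · exact hsr k hk1 h
          · have : k = i := by omega
            rw [this, hc]
            intro hcc; exact h1 (Option.some.inj hcc)
        · intro h; exact absurd h (by simp)
        · exact hacc
        · intro k hk hks
          rcases Nat.lt_or_ge k i with h | h
          · rcases hcomp k h hks with ⟨p, hp, hcv⟩ | ⟨s', hs', hsk⟩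
            · exact Or.inl ⟨p, hp, hcv⟩
            · exact Or.inr ⟨s', hs', hsk⟩
          · have : k = i := by omega
            exact Or.inr ⟨s, rfl, by omega⟩


lemma tokens_sound (t : List Char) : ∀ p ∈ tokGo (t ++ [' ']) 0 none [], InTok t p.1 p.2 :=
  (tokGo_spec t (t ++ [' ']) 0 none [] (by simp) (by simp) (fun _ => Or.inl rfl) (by simp)
    (fun k hk _ => absurd hk (by omega))).1

lemma tokens_cover (t : List Char) :
    ∀ k, k < t.length → t[k]? ≠ some ' ' →
      ∃ p ∈ tokGo (t ++ [' ']) 0 none [], p.1 ≤ k ∧ k < p.2 :=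
  (tokGo_spec t (t ++ [' ']) 0 none [] (by simp) (by simp) (fun _ => Or.inl rfl) (by simp)
    (fun k hk _ => absurd hk (by omega))).2

lemma main_eq (title query : String) :
    find_query_in_title title query = find_query_in_title_alt title query := by
  simp only [find_query_in_title, find_query_in_title_alt]
  set t := PySem.Chars.strip title.toList with htdef
  set q := PySem.Chars.strip query.toList with hqdef
  by_cases h1 : t = [] ∨ q = []
  · simp only [if_pos h1]
  · simp only [if_neg h1]
    set idx := PySem.Chars.find (PySem.Chars.lower t) (PySem.Chars.lower q) with hidxdef
    by_cases h2 : idx = -1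
    · simp only [if_pos h2]
    · simp only [if_neg h2]
      rw [not_or] at h1
      have hq := h1.2
      have hnn : 0 ≤ idx := by
        have := PySem.Chars.neg_one_le_find (PySem.Chars.lower t) (PySem.Chars.lower q)
        rw [← hidxdef] at this
        omega
      set i := idx.toNat with hidef
      have hpre := (PySem.Chars.find_spec (s := PySem.Chars.lower t) (sub := PySem.Chars.lower q)
        (by rw [← hidxdef]; exact hnn)).1
      rw [← hidxdef] at hpre
      obtain ⟨r, hr⟩ := hpre
      rw [← hidef] at hr
      have hlen0 := congrArg List.length hr
      simp only [List.length_drop, List.length_append, PySem.Chars.lower, List.length_map] at hlen0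
      have hq0 : 0 < q.length := List.length_pos_iff.mpr hq
      have hlen : i + q.length ≤ t.length := by omega
      have hit : i < t.length := by omega
      obtain ⟨c0, q', hq'⟩ : ∃ c0 q', q = c0 :: q' := by
        cases hqq : q with
        | nil => exact absurd hqq hq
        | cons a b => exact ⟨a, b, rfl⟩
      have h0 : ((PySem.Chars.lower t).drop i)[0]? = some (PySem.Chars.lowerChar c0) := by
        rw [← hr, hq']
        simp [PySem.Chars.lower]
      rw [List.getElem?_drop] at h0
      have hmap : (PySem.Chars.lower t)[i + 0]? = (t[i + 0]?).map PySem.Chars.lowerChar := by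
        simp [PySem.Chars.lower]
      rw [hmap] at h0
      have hsome : t[i + 0]? = some t[i] := by
        simp [List.getElem?_eq_getElem hit]
      rw [hsome] at h0
      have hlow : PySem.Chars.lowerChar t[i] = PySem.Chars.lowerChar c0 := by
        simpa using h0
      have hc0 : c0 ≠ ' ' := strip_head_ne_space query.toList c0 (by rw [← hqdef, hq']; rfl)
      have htine : t[i]? ≠ some ' ' := by
        intro hcon
        have : t[i] = ' ' := by
          have := List.getElem?_eq_getElem hit
          rw [hcon] at this
          exact (Option.some.inj this).symm
        rw [this] at hlow
        exact hc0 (lowerChar_eq_space c0 (by rw [← hlow]; decide))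
      cases hfL : (tokGo (t ++ [' ']) 0 none []).find?
          (fun p => decide (p.1 ≤ i) && decide (i < p.2)) with
      | none =>
        exfalso
        obtain ⟨p, hp, hc1, hc2⟩ := tokens_cover t i hit htine
        have := List.find?_eq_none.mp hfL p hp
        simp [hc1, hc2] at this
      | some p =>
        have hpredL := List.find?_some hfL
        simp only [Bool.and_eq_true, decide_eq_true_eq] at hpredL
        have hLe : expandLeft t i = p.1 :=
          expandLeft_eq t p.1 p.2 (tokens_sound t p (List.mem_of_find?_eq_some hfL))
            i hpredL.1 hpredL.2
        cases hfR : (tokGo (t ++ [' ']) 0 none []).find?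
            (fun p => decide (p.1 ≤ i + q.length) && decide (i + q.length < p.2)) with
        | none =>
          have hRe : expandRight t (i + q.length) = i + q.length := by
            apply expandRight_eq t (i + q.length) ?_ hlen (i + q.length) le_rfl
              (fun k hk1 hk2 => absurd (lt_of_le_of_lt hk1 hk2) (lt_irrefl _))
            by_cases hpl : i + q.length = t.length
            · exact Or.inl hpl
            · right
              have hplt : i + q.length < t.length := by omega
              by_cases hsp : t[i + q.length]? = some ' '
              · exact hsp
              · exfalso
                obtain ⟨p', hp', hc1, hc2⟩ := tokens_cover t (i + q.length) hplt hsp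
                have := List.find?_eq_none.mp hfR p' hp'
                simp [hc1, hc2] at this
          rw [hLe, hRe]
        | some p2 =>
          have hpredR := List.find?_some hfR
          simp only [Bool.and_eq_true, decide_eq_true_eq] at hpredR
          obtain ⟨hse, hel, hrange, _, hrb⟩ := tokens_sound t p2 (List.mem_of_find?_eq_some hfR)
          have hRe : expandRight t (i + q.length) = p2.2 :=
            expandRight_eq t p2.2 hrb hel (i + q.length) (le_of_lt hpredR.2)
              (fun k hk1 hk2 => hrange k (le_trans hpredR.1 hk1) hk2)
          rw [hLe, hRe]

-- ===== VERDICT (by name: the statement is the Claim_ definition above) =====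
theorem find_query_in_title_spec : Claim_equal_find_query_in_title := by
  intro title query _
  show find_query_in_title title query = find_query_in_title_alt title query
  exact main_eq title query
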